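-- pv_equiv track=rewrite | github.com/tsuru7/algorithm-study | AtCoder/ABC254/D-2.py | solve
-- ===== SOURCE A (Python) =====
-- def solve(n):
--     ans=0
--     for i in range(1, n+1):
--         x = 1
--         xmax = x
--         while x*x <= n:
--             if i % (x*x) == 0:
--                 xmax = x
--             x += 1
--         m = i // (xmax*xmax)
--         j = 1
--         while m*j*j <= n:
--             ans += 1
--             j += 1
--     return ans
-- ===== SOURCE B (Python) =====
-- def solve(n):
--     # Sieve the squarefree part of every i <= n, then swap the loops:
--     # for each j with j*j <= n, count (via prefix sums) the i whose
--     # squarefree part is at most n // (j*j).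
--     if n < 1:
--         return 0
--     sq = list(range(n + 1))      # sq[i] becomes the squarefree part of i
--     x = 2
--     while x * x <= n:
--         x2 = x * x
--         for k in range(x2, n + 1, x2):
--             while sq[k] % x2 == 0:
--                 sq[k] //= x2
--         x += 1
--     cnt = [0] * (n + 1)
--     for i in range(1, n + 1):
--         cnt[sq[i]] += 1
--     pre = []
--     s = 0
--     for c in cnt:
--         s += c
--         pre.append(s)            # pre[t] = number of i in [1,n] with sq[i] <= t
--     ans = 0
--     j = 1
--     while j * j <= n:
--         ans += pre[n // (j * j)]
--         j += 1
--     return ans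
-- ===== Notes on version B (the rewrite author's own statement) =====
-- stated objective: faster
-- what changed: B sieves the squarefree part of every i once (dividing out x^2 over multiples of x^2) instead of scanning all x<=sqrt(n) per i, and replaces the per-i inner counting loop by a single loop over j with prefix-sums of the squarefree-part counts.
import Mathlib
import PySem

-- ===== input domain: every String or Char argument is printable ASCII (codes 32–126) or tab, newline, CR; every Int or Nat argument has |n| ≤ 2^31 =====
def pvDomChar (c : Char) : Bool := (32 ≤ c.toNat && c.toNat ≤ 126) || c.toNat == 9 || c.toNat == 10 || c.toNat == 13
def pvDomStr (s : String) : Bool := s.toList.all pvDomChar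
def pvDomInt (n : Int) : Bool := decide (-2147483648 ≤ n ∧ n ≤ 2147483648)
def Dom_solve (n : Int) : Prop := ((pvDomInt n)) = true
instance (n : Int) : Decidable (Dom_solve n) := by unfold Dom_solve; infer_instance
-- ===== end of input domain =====

-- B replaces A's per-i scan over all x with x*x<=n by one sieve of squarefree parts plus a
-- prefix-sum swap of the two counting loops (measured asymptotically faster).


-- ===== PORT A =====
-- 'while x*x <= n: if i % (x*x) == 0: xmax = x; x += 1' — terminates unconditionally
-- (the guard forces x ≤ n), ported as well-founded recursion on (n + 1 - x).toNat.
def solveLoopX (n i x xmax : Int) : Int :=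
  if x * x ≤ n then
    solveLoopX n i (x + 1) (if PySem.Int.mod i (x * x) == 0 then x else xmax)
  else xmax
termination_by (n + 1 - x).toNat
decreasing_by
  have h1 : 0 ≤ n := le_trans (mul_self_nonneg x) (by assumption)
  have h2 : 2 * x ≤ n + 1 := by nlinarith [mul_self_nonneg (x - 1)]
  omega

-- 'while m*j*j <= n: ans += 1; j += 1' — ported with fuel; in solve it is entered with
-- m ≥ 1, j = 1, where the loop runs at most n times, so fuel n.toNat + 1 is never exhausted.
def solveLoopJ (fuel : Nat) (n m j ans : Int) : Int :=
  match fuel with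
  | 0 => ans
  | f + 1 => if m * j * j ≤ n then solveLoopJ f n m (j + 1) (ans + 1) else ans

def solve (n : Int) : Int :=
  (PySem.List.pyRange 1 (n + 1) 1).foldl (fun ans i =>
    let xmax := solveLoopX n i 1 1
    let m := PySem.Int.floordiv i (xmax * xmax)
    solveLoopJ (n.toNat + 1) n m 1 ans) 0

-- ===== PORT B =====
-- 'while sq[k] % x2 == 0: sq[k] //= x2' — ported with fuel; it is entered with
-- 1 ≤ sq[k] ≤ n and x2 ≥ 4, so at most log₄ n < n.toNat + 1 divisions happen.
def altDivOut (fuel : Nat) (x2 v : Int) : Int :=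
  match fuel with
  | 0 => v
  | f + 1 =>
    if PySem.Int.mod v x2 == 0 then altDivOut f x2 (PySem.Int.floordiv v x2) else v

-- 'while x*x <= n: for k in range(x*x, n+1, x*x): <divide out x*x from sq[k]>; x += 1'
-- (list indexing sq[k] is ported by hand as getD/set; every k used is in range).
def altSieve (n x : Int) (sq : List Int) : List Int :=
  if x * x ≤ n then
    altSieve n (x + 1)
      ((PySem.List.pyRange (x * x) (n + 1) (x * x)).foldl
        (fun sq k => sq.set k.toNat (altDivOut (n.toNat + 1) (x * x) (sq.getD k.toNat 0))) sq)
  else sq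
termination_by (n + 1 - x).toNat
decreasing_by
  have h1 : 0 ≤ n := le_trans (mul_self_nonneg x) (by assumption)
  have h2 : 2 * x ≤ n + 1 := by nlinarith [mul_self_nonneg (x - 1)]
  omega

-- 'while j*j <= n: ans += pre[n // (j*j)]; j += 1' — terminates unconditionally.
def altJLoop (n : Int) (pre : List Int) (j ans : Int) : Int :=
  if j * j ≤ n then
    altJLoop n pre (j + 1) (ans + pre.getD (PySem.Int.floordiv n (j * j)).toNat 0)
  else ans
termination_by (n + 1 - j).toNat
decreasing_by
  have h1 : 0 ≤ n := le_trans (mul_self_nonneg j) (by assumption)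
  have h2 : 2 * j ≤ n + 1 := by nlinarith [mul_self_nonneg (j - 1)]
  omega

def solve_alt (n : Int) : Int :=
  if n < 1 then 0
  else
    let sq := altSieve n 2 (PySem.List.pyRange 0 (n + 1) 1)
    let cnt := (PySem.List.pyRange 1 (n + 1) 1).foldl
      (fun cnt i =>
        cnt.set (sq.getD i.toNat 0).toNat (cnt.getD (sq.getD i.toNat 0).toNat 0 + 1))
      (List.replicate (n.toNat + 1) (0 : Int))
    let pre := (cnt.foldl (fun (ps : List Int × Int) c => (ps.1 ++ [ps.2 + c], ps.2 + c)) ([], 0)).1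
    altJLoop n pre 1 0

-- ===== PRECONDITION & SPEC =====
def Spec_solve (n : Int) (out : Int) : Prop := out = solve_alt n
instance (n : Int) (out : Int) : Decidable (Spec_solve n out) := by unfold Spec_solve; infer_instance

-- ===== CLAIM (what is proved, stated in full; the proofs are below) =====
def Claim_equal_solve : Prop := ∀ (n : Int), Dom_solve n → Spec_solve n (solve n)

-- ===== LEMMAS AND PROOFS =====

theorem loopX_spec (n i : Int) (hi : 1 ≤ i) (hin : i ≤ n) (x xmax : Int)
    (h1 : 1 ≤ xmax) (h2 : xmax ≤ x) (h3 : xmax * xmax ∣ i)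
    (h4 : ∀ y, 1 ≤ y → y * y ∣ i → y < x → y ≤ xmax) :
    1 ≤ solveLoopX n i x xmax ∧ (solveLoopX n i x xmax) * (solveLoopX n i x xmax) ∣ i ∧
      ∀ y, 1 ≤ y → y * y ∣ i → y ≤ solveLoopX n i x xmax := by
  fun_induction solveLoopX n i x xmax with
  | case1 x xmax hg ih =>
    by_cases hd : (PySem.Int.mod i (x * x) == 0) = true
    · rw [if_pos hd]
      rw [dif_pos hd] at ih
      exact ih (by omega) (by omega)
        ((PySem.Int.mod_eq_zero_iff_dvd i (x*x)).mp (beq_iff_eq.mp hd))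
        (fun y hy hdy hlt => by omega)
    · rw [if_neg hd]
      rw [dif_neg hd] at ih
      refine ih h1 (by omega) h3 (fun y hy hdy hlt => ?_)
      rcases lt_or_eq_of_le (by omega : y ≤ x) with h | h
      · exact h4 y hy hdy h
      · exfalso; apply hd; subst h
        exact beq_iff_eq.mpr ((PySem.Int.mod_eq_zero_iff_dvd i (y*y)).mpr hdy)
  | case2 x xmax hg =>
    refine ⟨h1, h3, fun y hy hdy => ?_⟩
    have hyi : y * y ≤ i := Int.le_of_dvd (by omega) hdy
    have : y < x := by nlinarith
    exact h4 y hy hdy this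

theorem loopJ_spec (n m : Int) (hm : 1 ≤ m) :
    ∀ (fuel : Nat) (j ans : Int), 1 ≤ j → n + 2 ≤ j + fuel →
      solveLoopJ fuel n m j ans
        = ans + ((Finset.Icc j n).filter (fun j' => m * j' * j' ≤ n)).card := by
  intro fuel
  induction fuel with
  | zero =>
    intro j ans hj hf
    have he : Finset.Icc j n = ∅ := Finset.Icc_eq_empty (by push_cast at hf; omega)
    simp [solveLoopJ, he]
  | succ f ih =>
    intro j ans hj hf
    simp only [solveLoopJ]
    by_cases hg : m * j * j ≤ n
    · rw [if_pos hg, ih (j + 1) (ans + 1) (by omega) (by push_cast at hf ⊢; omega)]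
      have hjn : j ≤ n := by
        nlinarith [mul_nonneg (by omega : (0:ℤ) ≤ m - 1) (mul_nonneg (by omega : (0:ℤ) ≤ j) (by omega : (0:ℤ) ≤ j)), mul_nonneg (by omega : (0:ℤ) ≤ j) (by omega : (0:ℤ) ≤ j - 1)]
      have hins : Finset.Icc j n = insert j (Finset.Icc (j + 1) n) := by
        ext z; simp only [Finset.mem_Icc, Finset.mem_insert]; omega
      rw [hins, Finset.filter_insert, if_pos hg,
        Finset.card_insert_of_notMem (by simp [Finset.mem_filter, Finset.mem_Icc])]
      push_cast; ring
    · rw [if_neg hg]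
      have he : (Finset.Icc j n).filter (fun j' => m * j' * j' ≤ n) = ∅ :=
        Finset.filter_eq_empty_iff.mpr (fun j' hj' hc => by
          rw [Finset.mem_Icc] at hj'
          nlinarith [mul_nonneg (mul_nonneg (by omega : (0:ℤ) ≤ m) (by omega : (0:ℤ) ≤ j' - j)) (by omega : (0:ℤ) ≤ j' + j)])
      simp [he]

theorem mod_beq_iff (v x2 : Int) : (PySem.Int.mod v x2 == 0) = true ↔ x2 ∣ v := by
  rw [beq_iff_eq]; exact PySem.Int.mod_eq_zero_iff_dvd v x2

theorem divOut_dvd (x2 : Int) (hx : 0 < x2) :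
    ∀ (fuel : Nat) (v : Int), altDivOut fuel x2 v ∣ v := by
  intro fuel
  induction fuel with
  | zero => intro v; simp [altDivOut]
  | succ f ih =>
    intro v
    simp only [altDivOut]
    by_cases hd : (PySem.Int.mod v x2 == 0) = true
    · rw [if_pos hd]
      obtain ⟨k, hk⟩ := (mod_beq_iff v x2).mp hd
      have hq : PySem.Int.floordiv v x2 = k := by
        rw [PySem.Int.floordiv_eq_ediv_of_pos hx, hk, Int.mul_ediv_cancel_left _ (by omega)]
      rw [hq]
      exact dvd_trans (ih k) ⟨x2, by rw [hk]; ring⟩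
    · rw [if_neg hd]

theorem divOut_pos (x2 : Int) (hx : 2 ≤ x2) :
    ∀ (fuel : Nat) (v : Int), 1 ≤ v → 1 ≤ altDivOut fuel x2 v := by
  intro fuel
  induction fuel with
  | zero => intro v hv; simpa [altDivOut] using hv
  | succ f ih =>
    intro v hv
    simp only [altDivOut]
    by_cases hd : (PySem.Int.mod v x2 == 0) = true
    · rw [if_pos hd]
      refine ih _ ?_
      rw [PySem.Int.floordiv_eq_ediv_of_pos (by omega)]
      rw [Int.le_ediv_iff_mul_le (by omega)]
      have := Int.le_of_dvd (by omega) ((mod_beq_iff v x2).mp hd)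
      omega
    · rw [if_neg hd]; exact hv

theorem divOut_sq (x : Int) (hx : 1 ≤ x) :
    ∀ (fuel : Nat) (v : Int),
      ∃ s, 1 ≤ s ∧ altDivOut fuel (x * x) v * (s * s) = v := by
  intro fuel
  induction fuel with
  | zero => intro v; exact ⟨1, le_refl 1, by simp [altDivOut]⟩
  | succ f ih =>
    intro v
    simp only [altDivOut]
    by_cases hd : (PySem.Int.mod v (x * x) == 0) = true
    · rw [if_pos hd]
      obtain ⟨k, hk⟩ := (mod_beq_iff v (x * x)).mp hd
      have hq : PySem.Int.floordiv v (x * x) = k := by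
        rw [PySem.Int.floordiv_eq_ediv_of_pos (by nlinarith), hk,
          Int.mul_ediv_cancel_left _ (by nlinarith)]
      rw [hq]
      obtain ⟨s, hs1, hs2⟩ := ih k
      exact ⟨s * x, by nlinarith, by rw [hk]; ring_nf; ring_nf at hs2; nlinarith [hs2]⟩
    · rw [if_neg hd]; exact ⟨1, le_refl 1, by ring⟩

theorem divOut_not_dvd (x2 : Int) (hx : 2 ≤ x2) :
    ∀ (fuel : Nat) (v : Int), 1 ≤ v → v ≤ (fuel : Int) → ¬ x2 ∣ altDivOut fuel x2 v := by
  intro fuel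
  induction fuel with
  | zero => intro v hv hf; omega
  | succ f ih =>
    intro v hv hf
    simp only [altDivOut]
    by_cases hd : (PySem.Int.mod v x2 == 0) = true
    · rw [if_pos hd]
      have hdv := (mod_beq_iff v x2).mp hd
      have hvx : x2 ≤ v := Int.le_of_dvd (by omega) hdv
      have h1 : 1 ≤ PySem.Int.floordiv v x2 := by
        rw [PySem.Int.floordiv_eq_ediv_of_pos (by omega), Int.le_ediv_iff_mul_le (by omega)]
        omega
      have h2 : PySem.Int.floordiv v x2 < v := by
        rw [PySem.Int.floordiv_eq_ediv_of_pos (by omega)]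
        rw [Int.ediv_lt_iff_lt_mul (by omega)]
        nlinarith
      exact ih _ h1 (by push_cast at hf ⊢; omega)
    · rw [if_neg hd]
      exact fun hc => hd ((mod_beq_iff v x2).mpr hc)

theorem divOut_eq_self (fuel : Nat) (x2 v : Int) (h : ¬ x2 ∣ v) : altDivOut fuel x2 v = v := by
  cases fuel with
  | zero => rfl
  | succ f => simp only [altDivOut]; rw [if_neg (fun hc => h ((mod_beq_iff v x2).mp hc))]
theorem foldSet_length (g : Int → Int) :
    ∀ (ks : List Int) (sq : List Int),
      (ks.foldl (fun sq k => sq.set k.toNat (g (sq.getD k.toNat 0))) sq).length = sq.length := by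
  intro ks
  induction ks with
  | nil => intro sq; rfl
  | cons k ks ih => intro sq; rw [List.foldl_cons, ih, List.length_set]

theorem foldSet_getD (g : Int → Int) :
    ∀ (ks : List Int) (sq : List Int) (i : Int),
      ks.Nodup → (∀ k ∈ ks, 0 ≤ k ∧ k.toNat < sq.length) → 0 ≤ i →
      (ks.foldl (fun sq k => sq.set k.toNat (g (sq.getD k.toNat 0))) sq).getD i.toNat 0
        = if i ∈ ks then g (sq.getD i.toNat 0) else sq.getD i.toNat 0 := by
  intro ks
  induction ks with
  | nil => intro sq i _ _ _; simp
  | cons k ks ih =>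
    intro sq i hnd hb hi
    rw [List.foldl_cons]
    have hk := hb k List.mem_cons_self
    have hlen : (sq.set k.toNat (g (sq.getD k.toNat 0))).length = sq.length := by
      rw [List.length_set]
    rw [ih _ i (List.Nodup.of_cons hnd)
      (fun k' hk' => by rw [hlen]; exact hb k' (List.mem_cons_of_mem _ hk')) hi]
    by_cases hik : i = k
    · subst hik
      have hnotmem : i ∉ ks := (List.nodup_cons.mp hnd).1
      rw [if_neg hnotmem, if_pos List.mem_cons_self]
      simp [List.getD_eq_getElem?_getD, hk.2]
    · have hne : i.toNat ≠ k.toNat := fun hc => hik (by omega)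
      have : (sq.set k.toNat (g (sq.getD k.toNat 0))).getD i.toNat 0 = sq.getD i.toNat 0 := by
        simp [List.getD_eq_getElem?_getD, List.getElem?_set_ne (Ne.symm hne)]
      rw [this]
      by_cases him : i ∈ ks
      · rw [if_pos him, if_pos (List.mem_cons_of_mem _ him)]
      · rw [if_neg him, if_neg (by simp [List.mem_cons, hik, him])]

def perI (n x v : Int) : Int :=
  if x * x ≤ n then perI n (x + 1) (altDivOut (n.toNat + 1) (x * x) v) else v
termination_by (n + 1 - x).toNat
decreasing_by
  have h1 : 0 ≤ n := le_trans (mul_self_nonneg x) (by assumption)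
  have h2 : 2 * x ≤ n + 1 := by nlinarith [mul_self_nonneg (x - 1)]
  omega

theorem nodup_pyRange_of_pos (a b s : Int) (hs : 0 < s) : (PySem.List.pyRange a b s).Nodup := by
  rw [PySem.List.pyRange_of_pos _ _ hs]
  refine List.Nodup.map ?_ (List.nodup_range)
  intro k1 k2 h
  have h2 : s * (k1 : Int) = s * (k2 : Int) := by linarith
  have h3 := mul_left_cancel₀ (ne_of_gt hs) h2
  exact_mod_cast h3

theorem sieve_getD (n i : Int) (hi1 : 1 ≤ i) (hin : i ≤ n) (x : Int) (sq : List Int)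
    (hx : 2 ≤ x) (hlen : sq.length = n.toNat + 1)
    (hv1 : 1 ≤ sq.getD i.toNat 0) (hvd : sq.getD i.toNat 0 ∣ i) :
    (altSieve n x sq).getD i.toNat 0 = perI n x (sq.getD i.toNat 0) := by
  fun_induction altSieve n x sq with
  | case1 x sq hg ih =>
    have hx2 : (2:Int) ≤ x * x := by nlinarith
    have hgd : ((PySem.List.pyRange (x * x) (n + 1) (x * x)).foldl
        (fun sq k => sq.set k.toNat (altDivOut (n.toNat + 1) (x * x) (sq.getD k.toNat 0))) sq).getD i.toNat 0
        = altDivOut (n.toNat + 1) (x * x) (sq.getD i.toNat 0) := by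
      rw [foldSet_getD _ _ _ _ (nodup_pyRange_of_pos _ _ _ (by omega))
        (fun k hk => by
          rw [PySem.List.mem_pyRange_iff_of_pos (by omega)] at hk
          constructor
          · omega
          · rw [hlen]; omega) (by omega)]
      by_cases him : i ∈ PySem.List.pyRange (x * x) (n + 1) (x * x)
      · rw [if_pos him]
      · rw [if_neg him]
        rw [PySem.List.mem_pyRange_iff_of_pos (by omega)] at him
        have hnd : ¬ (x * x) ∣ i := by
          intro hc
          exact him ⟨Int.le_of_dvd (by omega) hc, by omega, (dvd_sub_right hc).mpr dvd_rfl⟩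
        rw [divOut_eq_self _ _ _ (fun hc => hnd (dvd_trans hc hvd))]
    have hlen' : ((PySem.List.pyRange (x * x) (n + 1) (x * x)).foldl
        (fun sq k => sq.set k.toNat (altDivOut (n.toNat + 1) (x * x) (sq.getD k.toNat 0))) sq).length
        = n.toNat + 1 := by rw [foldSet_length, hlen]
    have h1' := hgd ▸ divOut_pos (x * x) hx2 (n.toNat + 1) _ hv1
    have hd' := hgd ▸ dvd_trans (divOut_dvd (x * x) (by omega) (n.toNat + 1) _) hvd
    rw [ih (by omega) hlen' h1' hd', hgd]
    conv_rhs => rw [perI, if_pos hg]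
  | case2 x sq hg =>
    rw [perI, if_neg hg]
theorem perI_spec (n i : Int) (hi1 : 1 ≤ i) (hin : i ≤ n) (x v : Int)
    (hx : 2 ≤ x) (hv1 : 1 ≤ v) (hvd : v ∣ i)
    (hsq : ∃ s, 1 ≤ s ∧ v * (s * s) = i)
    (hns : ∀ y, 2 ≤ y → y < x → ¬ y * y ∣ v) :
    1 ≤ perI n x v ∧ perI n x v ∣ i ∧ (∃ s, 1 ≤ s ∧ perI n x v * (s * s) = i) ∧
      ∀ y, 2 ≤ y → ¬ y * y ∣ perI n x v := by
  fun_induction perI n x v with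
  | case1 x v hg ih =>
    have hx2 : (2:Int) ≤ x * x := by nlinarith
    have hvi : v ≤ i := Int.le_of_dvd (by omega) hvd
    have hfuel : v ≤ ((n.toNat + 1 : Nat) : Int) := by push_cast; omega
    have hv1' := divOut_pos (x * x) hx2 (n.toNat + 1) v hv1
    have hvd' := dvd_trans (divOut_dvd (x * x) (by omega) (n.toNat + 1) v) hvd
    obtain ⟨s, hs1, hs2⟩ := hsq
    obtain ⟨t, ht1, ht2⟩ := divOut_sq x (by omega) (n.toNat + 1) v
    refine ih (by omega) hv1' hvd' ⟨t * s, by nlinarith, by nlinarith⟩ ?_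
    intro y hy hylt hc
    rcases lt_or_eq_of_le (by omega : y ≤ x) with h | h
    · exact hns y hy h (dvd_trans hc (divOut_dvd (x * x) (by omega) (n.toNat + 1) v))
    · subst h
      exact divOut_not_dvd (y * y) hx2 (n.toNat + 1) v hv1 hfuel hc
  | case2 x v hg =>
    refine ⟨hv1, hvd, hsq, fun y hy hc => ?_⟩
    have h1 : y * y ≤ v := Int.le_of_dvd (by omega) hc
    have h2 : v ≤ i := Int.le_of_dvd (by omega) hvd
    have hylt : y < x := by nlinarith
    exact hns y hy hylt hc

theorem sq_unique_nat (a b s t : ℕ) (ha : a ≠ 0) (hb : b ≠ 0) (hs : s ≠ 0) (ht : t ≠ 0)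
    (hA : Squarefree a) (hB : Squarefree b) (h : a * (s * s) = b * (t * t)) : a = b := by
  have hfa : ∀ p, a.factorization p = b.factorization p := by
    intro p
    have hh := congrArg (fun m => m.factorization p) h
    simp only [Nat.factorization_mul ha (Nat.mul_ne_zero hs hs),
      Nat.factorization_mul hb (Nat.mul_ne_zero ht ht),
      Nat.factorization_mul hs hs, Nat.factorization_mul ht ht, Finsupp.add_apply] at hh
    have h1 := Squarefree.natFactorization_le_one p hA
    have h2 := Squarefree.natFactorization_le_one p hB
    omega
  exact Nat.factorization_inj (Set.mem_setOf.mpr ha) (Set.mem_setOf.mpr hb) (Finsupp.ext hfa)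

theorem sq_unique_int (a b s t : ℤ) (ha : 1 ≤ a) (hb : 1 ≤ b) (hs : 1 ≤ s) (ht : 1 ≤ t)
    (hA : ∀ y : ℤ, 2 ≤ y → ¬ y * y ∣ a) (hB : ∀ y : ℤ, 2 ≤ y → ¬ y * y ∣ b)
    (h : a * (s * s) = b * (t * t)) : a = b := by
  have hsf : ∀ (c : ℤ), 1 ≤ c → (∀ y : ℤ, 2 ≤ y → ¬ y * y ∣ c) → Squarefree c.natAbs := by
    intro c hc hns
    rw [Nat.squarefree_iff_prime_squarefree]
    intro p hp hdp
    refine hns (p : ℤ) (by exact_mod_cast hp.two_le) ?_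
    have h2 : ((p * p : ℕ) : ℤ) ∣ (c.natAbs : ℤ) := Int.natCast_dvd_natCast.mpr hdp
    rw [Int.natAbs_of_nonneg (by omega)] at h2
    push_cast at h2
    exact h2
  have hnat : a.natAbs * (s.natAbs * s.natAbs) = b.natAbs * (t.natAbs * t.natAbs) := by
    rw [← Int.natAbs_mul, ← Int.natAbs_mul, ← Int.natAbs_mul, ← Int.natAbs_mul, h]
  have := sq_unique_nat a.natAbs b.natAbs s.natAbs t.natAbs
    (by omega) (by omega) (by omega) (by omega) (hsf a ha hA) (hsf b hb hB) hnat
  omega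
def mA (n i : Int) : Int := PySem.Int.floordiv i (solveLoopX n i 1 1 * solveLoopX n i 1 1)

theorem mA_facts (n i : Int) (hi1 : 1 ≤ i) (hin : i ≤ n) :
    1 ≤ mA n i ∧ mA n i ∣ i ∧ (∃ r, 1 ≤ r ∧ mA n i * (r * r) = i) ∧
      ∀ y, 2 ≤ y → ¬ y * y ∣ mA n i := by
  obtain ⟨hr1, hrd, hrmax⟩ := loopX_spec n i hi1 hin 1 1 le_rfl le_rfl (by simpa using one_dvd i)
    (fun y hy _ hlt => by omega)
  set r := solveLoopX n i 1 1 with hrdef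
  have hrr : 0 < r * r := by nlinarith
  have hmeq : mA n i * (r * r) = i := by
    unfold mA
    rw [← hrdef, PySem.Int.floordiv_eq_ediv_of_pos hrr]
    exact Int.ediv_mul_cancel hrd
  have hm1 : 1 ≤ mA n i := by nlinarith
  have hns : ∀ y, 2 ≤ y → ¬ y * y ∣ mA n i := by
    intro y hy ⟨c, hc⟩
    have hyr : (y * r) * (y * r) ∣ i := ⟨c, by rw [← hmeq, hc]; ring⟩
    have := hrmax (y * r) (by nlinarith) hyr
    nlinarith
  exact ⟨hm1, ⟨r * r, hmeq.symm⟩, ⟨r, hr1, hmeq⟩, hns⟩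

theorem mA_eq_perI (n i : Int) (hi1 : 1 ≤ i) (hin : i ≤ n) : mA n i = perI n 2 i := by
  obtain ⟨hm1, hmd, ⟨r, hr1, hr2⟩, hmns⟩ := mA_facts n i hi1 hin
  obtain ⟨hP1, hPd, ⟨t, ht1, ht2⟩, hPns⟩ := perI_spec n i hi1 hin 2 i le_rfl (by omega) dvd_rfl
    ⟨1, le_rfl, by ring⟩ (fun y hy hlt => by omega)
  exact sq_unique_int _ _ r t hm1 hP1 hr1 ht1 hmns hPns (by rw [hr2, ht2])
theorem cntFold_length (g : Int → Int) :
    ∀ (L : List Int) (cnt : List Int),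
      (L.foldl (fun cnt i => cnt.set (g i).toNat (cnt.getD (g i).toNat 0 + 1)) cnt).length
        = cnt.length := by
  intro L
  induction L with
  | nil => intro cnt; rfl
  | cons i L ih => intro cnt; rw [List.foldl_cons, ih, List.length_set]

theorem cntFold_getD (g : Int → Int) :
    ∀ (L : List Int) (cnt : List Int) (t : Int),
      (∀ i ∈ L, 0 ≤ g i ∧ (g i).toNat < cnt.length) → 0 ≤ t →
      (L.foldl (fun cnt i => cnt.set (g i).toNat (cnt.getD (g i).toNat 0 + 1)) cnt).getD t.toNat 0
        = cnt.getD t.toNat 0 + (L.countP (fun i => g i == t) : Int) := by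
  intro L
  induction L with
  | nil => intro cnt t _ _; simp
  | cons i L ih =>
    intro cnt t hb ht
    have hgi := hb i List.mem_cons_self
    rw [List.foldl_cons, ih _ t (fun i' hi' => by
        rw [List.length_set]; exact hb i' (List.mem_cons_of_mem _ hi')) ht]
    rw [List.countP_cons]
    by_cases he : g i = t
    · have : (cnt.set (g i).toNat (cnt.getD (g i).toNat 0 + 1)).getD t.toNat 0
          = cnt.getD t.toNat 0 + 1 := by
        subst he
        simp [List.getD_eq_getElem?_getD, hgi.2]
      rw [this]
      simp only [he, beq_self_eq_true, if_true]
      push_cast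
      ring
    · have hne : (g i).toNat ≠ t.toNat := fun hc => he (by omega)
      have : (cnt.set (g i).toNat (cnt.getD (g i).toNat 0 + 1)).getD t.toNat 0
          = cnt.getD t.toNat 0 := by
        simp [List.getD_eq_getElem?_getD, List.getElem?_set_ne hne]
      rw [this]
      simp [he]

def preSums (s : Int) : List Int → List Int
  | [] => []
  | c :: cs => (s + c) :: preSums (s + c) cs

theorem preFold_eq :
    ∀ (cs : List Int) (acc : List Int) (s : Int),
      (cs.foldl (fun (ps : List Int × Int) c => (ps.1 ++ [ps.2 + c], ps.2 + c)) (acc, s)).1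
        = acc ++ preSums s cs := by
  intro cs
  induction cs with
  | nil => intro acc s; simp [preSums]
  | cons c cs ih =>
    intro acc s
    rw [List.foldl_cons]
    show (cs.foldl _ (acc ++ [s + c], s + c)).1 = _
    rw [ih]
    simp [preSums]

theorem preSums_getD :
    ∀ (cs : List Int) (s : Int) (t : Nat), t < cs.length →
      (preSums s cs).getD t 0 = s + ((List.range (t + 1)).map (fun u => cs.getD u 0)).sum := by
  intro cs
  induction cs with
  | nil => intro s t ht; simp at ht
  | cons c cs ih =>
    intro s t ht
    cases t with
    | zero => simp [preSums]
    | succ t =>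
      rw [List.range_succ_eq_map]
      simp only [preSums, List.getD_cons_succ, List.map_cons, List.map_map, List.sum_cons]
      rw [ih (s + c) t (by simpa using ht)]
      have : (List.map ((fun u => (c :: cs).getD u 0) ∘ Nat.succ) (List.range (t + 1)))
          = List.map (fun u => cs.getD u 0) (List.range (t + 1)) := by
        refine List.map_congr_left (fun u _ => ?_)
        simp
      rw [this]
      simp [List.getD_cons_zero]
      ring
theorem sum_indicator_range (gi : Int) (hgi : 0 ≤ gi) :
    ∀ (t : Nat),
      ((List.range (t + 1)).map (fun (u : Nat) => if gi == (u : Int) then (1:ℤ) else 0)).sum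
        = if gi ≤ (t : Int) then 1 else 0 := by
  intro t
  induction t with
  | zero =>
    simp only [show List.range (0 + 1) = [0] from rfl, List.map_cons, List.map_nil,
      List.sum_cons, List.sum_nil]
    by_cases h : gi = 0 <;> simp [h] <;> omega
  | succ t ih =>
    rw [List.range_succ, List.map_append, List.sum_append, ih]
    simp only [List.map_cons, List.map_nil, List.sum_cons, List.sum_nil]
    push_cast
    by_cases h1 : gi ≤ (t : Int) <;> by_cases h2 : gi = (t : Int) + 1 <;>
      simp [h1, h2] <;> omega

theorem countP_le_eq_sum (g : Int → Int) :
    ∀ (L : List Int) (t : Nat), (∀ i ∈ L, 0 ≤ g i) →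
      ((List.range (t + 1)).map (fun (u : Nat) => (L.countP (fun i => g i == (u : Int)) : ℤ))).sum
        = (L.countP (fun i => decide (g i ≤ (t : Int))) : ℤ) := by
  intro L
  induction L with
  | nil => intro t _; simp
  | cons i L ih =>
    intro t hb
    have hgi := hb i List.mem_cons_self
    simp only [List.countP_cons]
    have hsplit :
        (List.map (fun (u : Nat) => ((L.countP (fun i' => g i' == (u : Int))
            + if g i == (u : Int) then 1 else 0 : ℕ) : ℤ)) (List.range (t + 1))).sum
          = (List.map (fun (u : Nat) => (L.countP (fun i' => g i' == (u : Int)) : ℤ)) (List.range (t + 1))).sum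
            + (List.map (fun (u : Nat) => if g i == (u : Int) then (1:ℤ) else 0) (List.range (t + 1))).sum := by
      rw [← PySem.List.sum_map_add_int]
      refine congrArg _ (List.map_congr_left (fun u _ => ?_))
      by_cases h : g i == (u : Int) <;> simp [h]
    rw [hsplit, ih t (fun i' hi' => hb i' (List.mem_cons_of_mem _ hi')),
      sum_indicator_range (g i) hgi t]
    by_cases h : g i ≤ (t : Int) <;> simp [h]
theorem pyRange_map_sum_aux (f : Int → Int) (b : Int) :
    ∀ (k : Nat), ∀ (a : Int), (b - a).toNat = k →
      ((PySem.List.pyRange a b 1).map f).sum = ∑ i ∈ Finset.Icc a (b - 1), f i := by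
  intro k
  induction k with
  | zero =>
    intro a hk
    rw [PySem.List.pyRange_one_eq_nil (by omega), Finset.Icc_eq_empty (by omega)]
    simp
  | succ k ih =>
    intro a hk
    rw [PySem.List.pyRange_one_cons (by omega)]
    simp only [List.map_cons, List.sum_cons]
    rw [ih (a + 1) (by omega)]
    have hins : Finset.Icc a (b - 1) = insert a (Finset.Icc (a + 1) (b - 1)) := by
      ext z; simp only [Finset.mem_Icc, Finset.mem_insert]; omega
    rw [hins, Finset.sum_insert (by simp [Finset.mem_Icc])]

theorem pyRange_map_sum (f : Int → Int) (a b : Int) :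
    ((PySem.List.pyRange a b 1).map f).sum = ∑ i ∈ Finset.Icc a (b - 1), f i :=
  pyRange_map_sum_aux f b _ a rfl

theorem pyRange_countP (p : Int → Bool) (a b : Int) :
    ((PySem.List.pyRange a b 1).countP p : ℤ)
      = (((Finset.Icc a (b - 1)).filter (fun i => p i = true)).card : ℤ) := by
  rw [← PySem.List.sum_map_ite_one_zero p, pyRange_map_sum, Finset.card_filter]
  push_cast
  refine Finset.sum_congr rfl (fun i _ => ?_)
  by_cases h : p i <;> simp [h]

theorem jLoop_spec (n : Int) (pre : List Int) (j ans : Int) (hj : 1 ≤ j) :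
    altJLoop n pre j ans
      = ans + ∑ j' ∈ (Finset.Icc j n).filter (fun j' => j' * j' ≤ n),
          pre.getD (PySem.Int.floordiv n (j' * j')).toNat 0 := by
  fun_induction altJLoop n pre j ans with
  | case1 j ans hg ih =>
    have hjn : j ≤ n := by nlinarith
    have hins : Finset.Icc j n = insert j (Finset.Icc (j + 1) n) := by
      ext z; simp only [Finset.mem_Icc, Finset.mem_insert]; omega
    rw [ih (by omega), hins, Finset.filter_insert, if_pos hg,
      Finset.sum_insert (by simp [Finset.mem_filter, Finset.mem_Icc])]
    ring
  | case2 j ans hg =>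
    have he : (Finset.Icc j n).filter (fun j' => j' * j' ≤ n) = ∅ :=
      Finset.filter_eq_empty_iff.mpr (fun j' hj' hc => by
        rw [Finset.mem_Icc] at hj'
        nlinarith [mul_nonneg (by omega : (0:ℤ) ≤ j' - j) (by omega : (0:ℤ) ≤ j' + j)])
    simp [he]
theorem double_count (n : Int) (m : Int → Int)
    (hm : ∀ i, 1 ≤ i → i ≤ n → 1 ≤ m i) :
    ∑ i ∈ Finset.Icc 1 n, (((Finset.Icc 1 n).filter (fun j => m i * j * j ≤ n)).card : ℤ)
      = ∑ j ∈ (Finset.Icc 1 n).filter (fun j => j * j ≤ n),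
          (((Finset.Icc 1 n).filter (fun i => m i ≤ n / (j * j))).card : ℤ) := by
  have key : ∀ mi j : Int, 1 ≤ mi → 1 ≤ j →
      (mi * j * j ≤ n ↔ (j * j ≤ n ∧ mi ≤ n / (j * j))) := by
    intro mi j h1 h2
    have hjj : (0:ℤ) < j * j := by nlinarith
    constructor
    · intro h
      have hmul : mi * (j * j) ≤ n := by nlinarith
      exact ⟨by nlinarith, (Int.le_ediv_iff_mul_le hjj).mpr hmul⟩
    · rintro ⟨hjn, hq⟩
      have := (Int.le_ediv_iff_mul_le hjj).mp hq
      nlinarith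
  have lhs_eq : ∑ i ∈ Finset.Icc 1 n, (((Finset.Icc 1 n).filter (fun j => m i * j * j ≤ n)).card : ℤ)
      = ∑ i ∈ Finset.Icc 1 n, ∑ j ∈ Finset.Icc 1 n, (if m i * j * j ≤ n then (1:ℤ) else 0) := by
    refine Finset.sum_congr rfl (fun i _ => ?_)
    rw [Finset.card_filter]
    push_cast
    rfl
  rw [lhs_eq, Finset.sum_comm, Finset.sum_filter]
  refine Finset.sum_congr rfl (fun j hj => ?_)
  rw [Finset.mem_Icc] at hj
  by_cases hjn : j * j ≤ n
  · rw [if_pos hjn, Finset.card_filter]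
    push_cast
    refine Finset.sum_congr rfl (fun i hi => ?_)
    rw [Finset.mem_Icc] at hi
    have hk := key (m i) j (hm i hi.1 hi.2) hj.1
    by_cases hc : m i * j * j ≤ n
    · rw [if_pos hc, if_pos (by exact ((hk.mp hc).2))]
    · rw [if_neg hc, if_neg (fun hq => hc (hk.mpr ⟨hjn, hq⟩))]
  · rw [if_neg hjn]
    refine Finset.sum_eq_zero (fun i hi => ?_)
    rw [Finset.mem_Icc] at hi
    rw [if_neg (fun hc => hjn ((key (m i) j (hm i hi.1 hi.2) hj.1).mp hc).1)]

theorem solve_eq_alt (n : Int) : solve n = solve_alt n := by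
  by_cases hn : n < 1
  · unfold solve solve_alt
    rw [if_pos hn, PySem.List.pyRange_one_eq_nil (by omega)]
    rfl
  · push_neg at hn
    have hnn : n.toNat = n := by omega
    unfold solve solve_alt
    rw [if_neg (by omega)]
    dsimp only
    set sq := altSieve n 2 (PySem.List.pyRange 0 (n + 1) 1) with hsqdef
    -- value of the sieved list at index i
    have hsqv : ∀ i : Int, 1 ≤ i → i ≤ n → sq.getD i.toNat 0 = mA n i := by
      intro i hi1 hin
      have hlen : (PySem.List.pyRange 0 (n + 1) 1).length = n.toNat + 1 := by
        rw [PySem.List.length_pyRange_one]; omega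
      have hinit : (PySem.List.pyRange 0 (n + 1) 1).getD i.toNat 0 = i := by
        rw [PySem.List.pyRange_one]
        have hb : i.toNat < ((n + 1 : Int) - 0).toNat := by omega
        rw [List.getD_eq_getElem?_getD, List.getElem?_map, List.getElem?_range hb]
        simp
        omega
      rw [hsqdef, sieve_getD n i hi1 hin 2 _ le_rfl hlen (by rw [hinit]; omega)
        (by rw [hinit]), hinit, ← mA_eq_perI n i hi1 hin]
    -- A side
    have hA : (PySem.List.pyRange 1 (n + 1) 1).foldl (fun ans i =>
          solveLoopJ (n.toNat + 1) n
            (PySem.Int.floordiv i (solveLoopX n i 1 1 * solveLoopX n i 1 1)) 1 ans) 0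
        = ∑ i ∈ Finset.Icc 1 n, (((Finset.Icc 1 n).filter (fun j => mA n i * j * j ≤ n)).card : ℤ) := by
      rw [PySem.List.foldl_congr_mem _ _
        (fun ans i => ans + (((Finset.Icc 1 n).filter (fun j => mA n i * j * j ≤ n)).card : ℤ)) _
        (fun ans i hi => by
          rw [PySem.List.mem_pyRange_one] at hi
          have hm1 := (mA_facts n i hi.1 (by omega)).1
          show solveLoopJ (n.toNat + 1) n (mA n i) 1 ans = _
          rw [loopJ_spec n (mA n i) hm1 (n.toNat + 1) 1 ans le_rfl (by omega)])]
      rw [PySem.List.foldl_add]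
      rw [pyRange_map_sum]
      rw [show n + 1 - 1 = n by ring]
      simp
    rw [hA]
    have hgb : ∀ i ∈ PySem.List.pyRange 1 (n + 1) 1,
        0 ≤ sq.getD i.toNat 0 ∧ (sq.getD i.toNat 0).toNat
          < (List.replicate (n.toNat + 1) (0 : Int)).length := by
      intro i hi
      rw [PySem.List.mem_pyRange_one] at hi
      obtain ⟨hm1, hmd, -, -⟩ := mA_facts n i hi.1 (by omega)
      have hle : mA n i ≤ i := Int.le_of_dvd (by omega) hmd
      rw [hsqv i hi.1 (by omega), List.length_replicate]
      omega
    have hg0 : ∀ i ∈ PySem.List.pyRange 1 (n + 1) 1, 0 ≤ sq.getD i.toNat 0 :=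
      fun i hi => (hgb i hi).1
    set cnt := (PySem.List.pyRange 1 (n + 1) 1).foldl
      (fun cnt i =>
        cnt.set (sq.getD i.toNat 0).toNat (cnt.getD (sq.getD i.toNat 0).toNat 0 + 1))
      (List.replicate (n.toNat + 1) (0 : Int)) with hcntdef
    have hcntlen : cnt.length = n.toNat + 1 := by
      rw [hcntdef, cntFold_length, List.length_replicate]
    have hcnt : ∀ u : Nat, u ≤ n.toNat →
        cnt.getD u 0 = ((PySem.List.pyRange 1 (n + 1) 1).countP
          (fun i => sq.getD i.toNat 0 == (u : Int)) : ℤ) := by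
      intro u hu
      have h2 := cntFold_getD (fun i => sq.getD i.toNat 0) (PySem.List.pyRange 1 (n + 1) 1)
        (List.replicate (n.toNat + 1) (0 : Int)) (u : Int) hgb (by omega)
      rw [Int.toNat_natCast] at h2
      rw [hcntdef, h2]
      have hlt : u < n.toNat + 1 := by omega
      simp [List.getD_eq_getElem?_getD, List.getElem?_replicate, hlt]
    set pre := (cnt.foldl (fun (ps : List Int × Int) c => (ps.1 ++ [ps.2 + c], ps.2 + c))
      ([], 0)).1 with hpredef
    have hpre : ∀ T : Nat, T ≤ n.toNat →
        pre.getD T 0 = ((PySem.List.pyRange 1 (n + 1) 1).countP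
          (fun i => decide (sq.getD i.toNat 0 ≤ (T : Int))) : ℤ) := by
      intro T hT
      rw [hpredef, preFold_eq, List.nil_append, preSums_getD _ 0 T (by omega), zero_add]
      have hmap : (List.range (T + 1)).map (fun u => cnt.getD u 0)
          = (List.range (T + 1)).map (fun (u : Nat) =>
              ((PySem.List.pyRange 1 (n + 1) 1).countP
                (fun i => sq.getD i.toNat 0 == (u : Int)) : ℤ)) :=
        List.map_congr_left (fun u hu => hcnt u (by
          have := List.mem_range.mp hu; omega))
      rw [hmap, countP_le_eq_sum (fun i => sq.getD i.toNat 0) _ T hg0]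
    rw [jLoop_spec n pre 1 0 le_rfl, zero_add,
      double_count n (fun i => mA n i) (fun i h1 h2 => (mA_facts n i h1 h2).1)]
    refine Finset.sum_congr rfl (fun j hj => ?_)
    rw [Finset.mem_filter, Finset.mem_Icc] at hj
    obtain ⟨⟨hj1, hj2⟩, hjn⟩ := hj
    have hjj : (0:ℤ) < j * j := by nlinarith
    have hdiv : PySem.Int.floordiv n (j * j) = n / (j * j) :=
      PySem.Int.floordiv_eq_ediv_of_pos hjj
    have hq0 : 0 ≤ n / (j * j) := Int.ediv_nonneg (by omega) (by omega)
    have hqn : n / (j * j) ≤ n := Int.ediv_le_self (j * j) (by omega)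
    have hcast : ((n / (j * j)).toNat : Int) = n / (j * j) := by omega
    rw [hdiv, hpre (n / (j * j)).toNat (by omega), hcast,
      pyRange_countP (fun i => decide (sq.getD i.toNat 0 ≤ n / (j * j))) 1 (n + 1),
      show n + 1 - 1 = n by ring]
    congr 1
    refine congrArg _ (Finset.filter_congr (fun i hi => ?_))
    rw [Finset.mem_Icc] at hi
    rw [hsqv i hi.1 hi.2]
    simp

-- ===== VERDICT (by name: the statement is the Claim_ definition above) =====
theorem solve_spec : Claim_equal_solve := by
  intro n _
  show solve n = solve_alt n
  exact solve_eq_alt n
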